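-- pv_equiv track=rewrite | github.com/tuanx18/my_leetcode_completion | 1784_binary_most_ones_segment.py | checkOnesSegment
-- ===== SOURCE A (Python) =====
-- def checkOnesSegment(s: str) -> bool:
--     cons = True
--     for i in range(len(s)):
--         if s[i] == '0' and cons:
--             cons = False
--         if s[i] == '1' and not cons:
--             return False
--     return True
-- ===== SOURCE B (Python) =====
-- def checkOnesSegment(s: str) -> bool:
--     t = [c for c in s if c in '01']
--     return t == sorted(t, reverse=True)
-- ===== Notes on version B (the rewrite author's own statement) =====
-- stated objective: alternative
-- what changed: Replaces A's stateful flag scan with a sorting-based check: keep only the binary characters and accept iff that list equals its own descending sort (all ones before all zeros).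
import Mathlib
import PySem

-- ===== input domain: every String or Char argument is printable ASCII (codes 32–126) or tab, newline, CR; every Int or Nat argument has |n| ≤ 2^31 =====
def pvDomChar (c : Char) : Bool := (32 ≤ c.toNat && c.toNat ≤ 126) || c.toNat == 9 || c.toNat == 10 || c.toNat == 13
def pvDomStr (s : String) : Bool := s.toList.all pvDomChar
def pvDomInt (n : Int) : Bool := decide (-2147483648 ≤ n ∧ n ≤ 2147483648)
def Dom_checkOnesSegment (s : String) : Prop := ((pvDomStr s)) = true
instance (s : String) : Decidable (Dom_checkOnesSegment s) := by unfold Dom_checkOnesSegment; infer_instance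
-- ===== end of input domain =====

-- B replaces A's stateful flag scan by a sorting-based check: keep the binary characters and accept iff the list equals its own descending sort (objective: alternative).

-- ===== PORT A =====
-- A's loop over the characters with the `cons` flag, as structural recursion over the char list.
def checkOnesSegmentGo (cons : Bool) : List Char → Bool
  | [] => true
  | c :: rest =>
    let cons1 := if c = '0' ∧ cons then false else cons
    if c = '1' ∧ cons1 = false then false
    else checkOnesSegmentGo cons1 rest

def checkOnesSegment (s : String) : Bool := checkOnesSegmentGo true s.toList

-- ===== PORT B =====
-- B: t = [c for c in s if c in '01']; return t == sorted(t, reverse=True)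
def checkOnesSegment_alt (s : String) : Bool :=
  let t := s.toList.filter (fun c => PySem.Chars.isIn [c] ['0', '1'])
  decide (t = PySem.List.sorted t (fun c => c) true)

-- ===== PRECONDITION & SPEC =====
def Spec_checkOnesSegment (s : String) (out : Bool) : Prop := out = checkOnesSegment_alt s
instance (s : String) (out : Bool) : Decidable (Spec_checkOnesSegment s out) := by unfold Spec_checkOnesSegment; infer_instance

-- ===== CLAIM (what is proved, stated in full; the proofs are below) =====
def Claim_equal_checkOnesSegment : Prop := ∀ (s : String), Dom_checkOnesSegment s → Spec_checkOnesSegment s (checkOnesSegment s)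

-- ===== LEMMAS AND PROOFS =====

-- the filter predicate of B is membership in {'0','1'}
theorem binFilter_eq (c : Char) :
    PySem.Chars.isIn [c] ['0', '1'] = (decide (c = '0') || decide (c = '1')) := by
  by_cases h0 : c = '0'
  · subst h0; decide
  · by_cases h1 : c = '1'
    · subst h1; decide
    · have : PySem.Chars.isIn [c] ['0', '1'] = false := by
        rw [PySem.Chars.isIn_eq_false_iff]
        intro hc
        have hm := (List.singleton_infix_iff _ _).mp hc
        simp only [List.mem_cons, List.not_mem_nil, or_false] at hm
        rcases hm with h | h
        · exact h0 h
        · exact h1 h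
      simp [this, h0, h1]

-- with the flag already false, A's loop just looks for any '1'
theorem goA_false (l : List Char) : checkOnesSegmentGo false l = !decide ('1' ∈ l) := by
  induction l with
  | nil => simp [checkOnesSegmentGo]
  | cons c rest ih =>
    by_cases h : c = '1'
    · subst h; simp [checkOnesSegmentGo]
    · have h2 : ¬ ('1' : Char) = c := fun hh => h hh.symm
      simp [checkOnesSegmentGo, h, h2, ih]

-- abbreviation used by the proofs only: the binary subsequence filter
def binFilt (l : List Char) : List Char :=
  l.filter (fun c => decide (c = '0') || decide (c = '1'))

-- if no '1' occurs in l, the binary subsequence is non-increasing and bounded by '0'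
theorem pairwise_of_no_one (l : List Char) (h : '1' ∉ l) :
    (binFilt l).Pairwise (fun a b => b ≤ a) ∧ ∀ b ∈ binFilt l, b ≤ '0' := by
  induction l with
  | nil => simp [binFilt]
  | cons c rest ih =>
    have hc1 : c ≠ '1' := fun hh => h (hh ▸ List.mem_cons_self)
    have hrest : '1' ∉ rest := fun hh => h (List.mem_cons_of_mem _ hh)
    obtain ⟨hp, hb⟩ := ih hrest
    by_cases h0 : c = '0'
    · subst h0
      refine ⟨?_, ?_⟩
      · simp only [binFilt, List.filter_cons, decide_true, Bool.true_or, if_pos]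
        exact List.Pairwise.cons (fun b hb' => hb b hb') hp
      · intro b hbmem
        simp only [binFilt, List.filter_cons, decide_true, Bool.true_or, if_pos,
          List.mem_cons] at hbmem
        rcases hbmem with h | h
        · exact le_of_eq h
        · exact hb b h
    · have : binFilt (c :: rest) = binFilt rest := by
        simp [binFilt, h0, hc1]
      rw [this]; exact ⟨hp, hb⟩

-- A's loop with the flag true decides whether the binary subsequence is non-increasing
theorem goA_true (l : List Char) :
    checkOnesSegmentGo true l = decide ((binFilt l).Pairwise (fun a b => b ≤ a)) := by
  induction l with
  | nil => simp [checkOnesSegmentGo, binFilt]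
  | cons c rest ih =>
    by_cases h0 : c = '0'
    · subst h0
      have hstep : checkOnesSegmentGo true ('0' :: rest) = checkOnesSegmentGo false rest := by
        simp [checkOnesSegmentGo]
      rw [hstep, goA_false]
      have hfilt : binFilt ('0' :: rest) = '0' :: binFilt rest := by
        simp [binFilt]
      rw [hfilt]
      by_cases h1 : '1' ∈ rest
      · have hmem : '1' ∈ binFilt rest := by
          simp [binFilt, List.mem_filter, h1]
        have : ¬ (('0' :: binFilt rest).Pairwise (fun a b => b ≤ a)) := by
          intro hp
          have := (List.pairwise_cons.mp hp).1 '1' hmem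
          exact absurd this (by decide)
        simp [h1, this]
      · obtain ⟨hp, hb⟩ := pairwise_of_no_one rest h1
        have : ('0' :: binFilt rest).Pairwise (fun a b => b ≤ a) :=
          List.Pairwise.cons (fun b hb' => hb b hb') hp
        simp [h1, this]
    · by_cases h1 : c = '1'
      · subst h1
        have hstep : checkOnesSegmentGo true ('1' :: rest) = checkOnesSegmentGo true rest := by
          simp [checkOnesSegmentGo]
        rw [hstep, ih]
        have hfilt : binFilt ('1' :: rest) = '1' :: binFilt rest := by
          simp [binFilt]
        rw [hfilt]
        have hbound : ∀ b ∈ binFilt rest, b ≤ '1' := by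
          intro b hbmem
          simp only [binFilt, List.mem_filter, Bool.or_eq_true, decide_eq_true_eq] at hbmem
          rcases hbmem.2 with h | h <;> subst h <;> decide
        congr 1
        rw [eq_iff_iff, List.pairwise_cons]
        exact ⟨fun h => ⟨hbound, h⟩, fun h => h.2⟩
      · have hstep : checkOnesSegmentGo true (c :: rest) = checkOnesSegmentGo true rest := by
          simp [checkOnesSegmentGo, h0, h1]
        have hfilt : binFilt (c :: rest) = binFilt rest := by
          simp [binFilt, h0, h1]
        rw [hstep, hfilt, ih]

-- a list equals its own descending sort iff it is non-increasing
theorem self_eq_sorted_rev_iff (t : List Char) :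
    t = PySem.List.sorted t (fun c => c) true ↔ t.Pairwise (fun a b => b ≤ a) := by
  constructor
  · intro h
    have := PySem.List.sorted_pairwise_rev (xs := t) (key := fun c => c)
    rw [← h] at this
    exact this
  · intro h
    exact (PySem.List.sorted_rev_eq_self_of_pairwise (xs := t) (key := fun c => c) h).symm

theorem checkOnesSegment_eq (s : String) :
    checkOnesSegment s = checkOnesSegment_alt s := by
  unfold checkOnesSegment checkOnesSegment_alt
  have hfilt : s.toList.filter (fun c => PySem.Chars.isIn [c] ['0', '1']) = binFilt s.toList := by
    unfold binFilt
    exact List.filter_congr (fun c _ => binFilter_eq c)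
  rw [goA_true, hfilt]
  simp only [self_eq_sorted_rev_iff]

-- ===== VERDICT (by name: the statement is the Claim_ definition above) =====
theorem checkOnesSegment_spec : Claim_equal_checkOnesSegment := by
  intro s _
  exact checkOnesSegment_eq s
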